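-- pv_equiv track=rewrite | github.com/hojmax/ProjectEulerF- | Problem 51 (SLOW).py | hasRelation
-- ===== SOURCE A (Python) =====
-- def hasRelation(n1, n2):
--     # Assuming digitAmount(n1) == digitAmount(n2)
--     diff1 = -1
--     diff2 = -1
--     while n1 > 0:
--         if n1 % 10 != n2 % 10:
--             if diff1 == -1:
--                 diff1 = n1 % 10
--                 diff2 = n2 % 10
--             elif diff1 != n1 % 10 or diff2 != n2 % 10:
--                 return False
--         n1 //= 10
--         n2 //= 10
--     return True
-- ===== SOURCE B (Python) =====
-- def hasRelation(n1, n2):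
--     # Assuming digitAmount(n1) == digitAmount(n2)
--     def pairs(a, b):
--         return [] if a <= 0 else [(a % 10, b % 10)] + pairs(a // 10, b // 10)
--     mismatches = {p for p in pairs(n1, n2) if p[0] != p[1]}
--     return len(mismatches) <= 1
-- ===== Notes on version B (the rewrite author's own statement) =====
-- stated objective: simpler
-- what changed: Replaces the sentinel variables (diff1/diff2) and early-return branching with a two-phase decomposition: recursively extract the aligned digit pairs, collect the distinct mismatching pairs into a set, and return whether there is at most one.
import Mathlib
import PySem

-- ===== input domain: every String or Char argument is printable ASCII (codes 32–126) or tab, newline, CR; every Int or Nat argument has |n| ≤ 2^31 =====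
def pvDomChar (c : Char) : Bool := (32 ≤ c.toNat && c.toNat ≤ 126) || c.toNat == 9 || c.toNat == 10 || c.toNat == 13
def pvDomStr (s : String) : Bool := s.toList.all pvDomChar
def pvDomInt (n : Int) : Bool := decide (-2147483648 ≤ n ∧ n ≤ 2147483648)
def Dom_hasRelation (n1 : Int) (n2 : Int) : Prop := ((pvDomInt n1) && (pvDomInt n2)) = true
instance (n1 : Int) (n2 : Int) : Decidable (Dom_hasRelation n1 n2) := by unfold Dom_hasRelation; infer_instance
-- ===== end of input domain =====

-- B replaces A's first-mismatch sentinel variables and early exit with a two-phase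
-- decomposition (recursively extract the aligned digit pairs, then check the set of
-- mismatching pairs has at most one element); objective: simpler.


-- termination measure fact for both recursions (n //= 10 shrinks a positive n)
theorem pvDiv10_toNat_lt (n : Int) (h : 0 < n) :
    (PySem.Int.floordiv n 10).toNat < n.toNat := by
  rw [PySem.Int.floordiv_eq_ediv_of_pos (by omega)]
  have h1 : n / 10 < n := by apply Int.ediv_lt_of_lt_mul (by omega); omega
  have h2 : 0 ≤ n / 10 := Int.ediv_nonneg (by omega) (by omega)
  omega

-- ===== PORT A =====
-- A's while-loop as a recursion over the loop state (n1, n2, diff1, diff2)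
def hasRelationLoop (n1 : Int) (n2 : Int) (diff1 : Int) (diff2 : Int) : Bool :=
  if h : 0 < n1 then
    if PySem.Int.mod n1 10 ≠ PySem.Int.mod n2 10 then
      if diff1 = -1 then
        hasRelationLoop (PySem.Int.floordiv n1 10) (PySem.Int.floordiv n2 10)
          (PySem.Int.mod n1 10) (PySem.Int.mod n2 10)
      else if diff1 ≠ PySem.Int.mod n1 10 ∨ diff2 ≠ PySem.Int.mod n2 10 then
        false
      else
        hasRelationLoop (PySem.Int.floordiv n1 10) (PySem.Int.floordiv n2 10) diff1 diff2
    else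
      hasRelationLoop (PySem.Int.floordiv n1 10) (PySem.Int.floordiv n2 10) diff1 diff2
  else
    true
termination_by n1.toNat
decreasing_by all_goals exact pvDiv10_toNat_lt n1 h

def hasRelation (n1 : Int) (n2 : Int) : Bool := hasRelationLoop n1 n2 (-1) (-1)

-- ===== PORT B =====
-- helper 'pairs(a, b)' of Source B: the aligned digit pairs, least significant first
def pvPairs (a : Int) (b : Int) : List (Int × Int) :=
  if h : a ≤ 0 then []
  else (PySem.Int.mod a 10, PySem.Int.mod b 10) ::
    pvPairs (PySem.Int.floordiv a 10) (PySem.Int.floordiv b 10)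
termination_by a.toNat
decreasing_by exact pvDiv10_toNat_lt a (by omega)

def hasRelation_alt (n1 : Int) (n2 : Int) : Bool :=
  decide (PySem.Set.len
    (PySem.Set.ofList ((pvPairs n1 n2).filter (fun p => decide (p.1 ≠ p.2)))) ≤ 1)

-- ===== PRECONDITION & SPEC =====
def Spec_hasRelation (n1 : Int) (n2 : Int) (out : Bool) : Prop := out = hasRelation_alt n1 n2
instance (n1 : Int) (n2 : Int) (out : Bool) : Decidable (Spec_hasRelation n1 n2 out) := by unfold Spec_hasRelation; infer_instance

-- ===== CLAIM (what is proved, stated in full; the proofs are below) =====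
def Claim_equal_hasRelation : Prop := ∀ (n1 : Int) (n2 : Int), Dom_hasRelation n1 n2 → Spec_hasRelation n1 n2 (hasRelation n1 n2)

-- ===== LEMMAS AND PROOFS =====

-- the mismatching digit pairs (the list B's set comprehension ranges over)
def pvMis (n1 : Int) (n2 : Int) : List (Int × Int) :=
  (pvPairs n1 n2).filter (fun p => decide (p.1 ≠ p.2))

theorem pvPairs_nonpos {a b : Int} (h : a ≤ 0) : pvPairs a b = [] := by
  rw [pvPairs]; simp [h]

theorem pvPairs_pos {a b : Int} (h : 0 < a) :
    pvPairs a b = (PySem.Int.mod a 10, PySem.Int.mod b 10) ::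
      pvPairs (PySem.Int.floordiv a 10) (PySem.Int.floordiv b 10) := by
  rw [pvPairs]; simp [show ¬ a ≤ 0 by omega]

theorem pvMis_nonpos {a b : Int} (h : a ≤ 0) : pvMis a b = [] := by
  unfold pvMis; rw [pvPairs_nonpos h]; rfl

theorem pvMis_pos_ne {a b : Int} (h0 : 0 < a)
    (hm : PySem.Int.mod a 10 ≠ PySem.Int.mod b 10) :
    pvMis a b = (PySem.Int.mod a 10, PySem.Int.mod b 10) ::
      pvMis (PySem.Int.floordiv a 10) (PySem.Int.floordiv b 10) := by
  unfold pvMis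
  rw [pvPairs_pos h0, List.filter_cons, if_pos (by simpa using hm)]

theorem pvMis_pos_eq {a b : Int} (h0 : 0 < a)
    (hm : PySem.Int.mod a 10 = PySem.Int.mod b 10) :
    pvMis a b = pvMis (PySem.Int.floordiv a 10) (PySem.Int.floordiv b 10) := by
  unfold pvMis
  rw [pvPairs_pos h0, List.filter_cons, if_neg (by simpa using hm)]

-- loop invariant once a first mismatch (d1, d2) has been recorded (then d1 is a digit, so d1 ≠ -1):
-- the loop accepts iff every remaining mismatching pair equals (d1, d2)
theorem loop_all (k : Nat) : ∀ (n1 n2 d1 d2 : Int), n1.toNat ≤ k → d1 ≠ -1 →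
    hasRelationLoop n1 n2 d1 d2 = (pvMis n1 n2).all (fun q => decide (q = (d1, d2))) := by
  induction k with
  | zero =>
    intro n1 n2 d1 d2 hk hd
    have h0 : ¬ 0 < n1 := by omega
    rw [hasRelationLoop, dif_neg h0, pvMis_nonpos (show n1 ≤ 0 by omega)]
    rfl
  | succ k ih =>
    intro n1 n2 d1 d2 hk hd
    by_cases h0 : 0 < n1
    · have hrec : (PySem.Int.floordiv n1 10).toNat ≤ k := by
        have := pvDiv10_toNat_lt n1 h0; omega
      rw [hasRelationLoop, dif_pos h0]
      by_cases hm : PySem.Int.mod n1 10 ≠ PySem.Int.mod n2 10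
      · rw [if_pos hm, if_neg hd]
        by_cases hne : d1 ≠ PySem.Int.mod n1 10 ∨ d2 ≠ PySem.Int.mod n2 10
        · rw [if_pos hne]
          have hneq : (PySem.Int.mod n1 10, PySem.Int.mod n2 10) ≠ (d1, d2) := by
            intro he
            rw [Prod.mk.injEq] at he
            rcases hne with h | h <;> exact h (by omega)
          rw [pvMis_pos_ne h0 hm, List.all_cons, decide_eq_false hneq]
          rfl
        · rw [if_neg hne]
          push_neg at hne
          obtain ⟨h1, h2⟩ := hne
          subst h1; subst h2
          rw [ih _ _ _ _ hrec hd, pvMis_pos_ne h0 hm, List.all_cons,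
            decide_eq_true (rfl : ((PySem.Int.mod n1 10, PySem.Int.mod n2 10) : Int × Int) = _)]
          rw [Bool.true_and]
      · rw [if_neg hm]
        push_neg at hm
        rw [ih _ _ _ _ hrec hd, pvMis_pos_eq h0 hm]
    · rw [hasRelationLoop, dif_neg h0, pvMis_nonpos (show n1 ≤ 0 by omega)]
      rfl

-- the loop from its initial sentinel state: accepts iff all mismatching pairs equal the first one
theorem loop_start (k : Nat) : ∀ (n1 n2 : Int), n1.toNat ≤ k →
    hasRelationLoop n1 n2 (-1) (-1) =
      match pvMis n1 n2 with
      | [] => true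
      | p :: rest => rest.all (fun q => decide (q = p)) := by
  induction k with
  | zero =>
    intro n1 n2 hk
    have h0 : ¬ 0 < n1 := by omega
    rw [hasRelationLoop, dif_neg h0, pvMis_nonpos (show n1 ≤ 0 by omega)]
  | succ k ih =>
    intro n1 n2 hk
    by_cases h0 : 0 < n1
    · have hrec : (PySem.Int.floordiv n1 10).toNat ≤ k := by
        have := pvDiv10_toNat_lt n1 h0; omega
      rw [hasRelationLoop, dif_pos h0]
      by_cases hm : PySem.Int.mod n1 10 ≠ PySem.Int.mod n2 10
      · rw [if_pos hm, if_pos rfl]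
        have hd : PySem.Int.mod n1 10 ≠ -1 := by
          have := PySem.Int.mod_nonneg n1 (show (0:Int) < 10 by omega)
          omega
        rw [loop_all k _ _ _ _ hrec hd, pvMis_pos_ne h0 hm]
      · rw [if_neg hm]
        push_neg at hm
        rw [ih _ _ hrec, pvMis_pos_eq h0 hm]
    · rw [hasRelationLoop, dif_neg h0, pvMis_nonpos (show n1 ≤ 0 by omega)]

theorem foldl_add_len_le {α : Type} [BEq α] :
    ∀ (l : List α) (s : PySem.Set α), s.length ≤ (l.foldl PySem.Set.add s).length := by
  intro l
  induction l with
  | nil => intro s; simp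
  | cons x l ih =>
    intro s
    refine le_trans ?_ (ih (PySem.Set.add s x))
    simp only [PySem.Set.add]
    split <;> simp

-- the set {p, q1, …, qm} has at most one element iff every qi equals p
theorem foldl_add_singleton {α : Type} [DecidableEq α] [BEq α] [LawfulBEq α] :
    ∀ (l : List α) (p : α),
    decide ((l.foldl PySem.Set.add [p]).length ≤ 1) = l.all (fun q => decide (q = p)) := by
  intro l
  induction l with
  | nil => intro p; simp
  | cons q l ih =>
    intro p
    by_cases hq : q = p
    · subst hq
      have hadd : PySem.Set.add [q] q = [q] := by
        simp [PySem.Set.add, PySem.Set.contains]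
      simp only [List.foldl_cons, hadd, List.all_cons]
      rw [ih]
      simp
    · have hadd : PySem.Set.add [p] q = [p, q] := by
        simp [PySem.Set.add, PySem.Set.contains, hq]
      have hlen : 2 ≤ ((q :: l).foldl PySem.Set.add [p]).length := by
        simpa [hadd] using foldl_add_len_le l [p, q]
      simp only [List.all_cons]
      rw [decide_eq_false hq]
      simp only [Bool.false_and]
      apply decide_eq_false
      omega

-- ===== VERDICT (by name: the statement is the Claim_ definition above) =====
theorem hasRelation_spec : Claim_equal_hasRelation := by
  intro n1 n2 _
  unfold Spec_hasRelation hasRelation hasRelation_alt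
  rw [loop_start n1.toNat n1 n2 le_rfl]
  rw [show ((pvPairs n1 n2).filter (fun p => decide (p.1 ≠ p.2))) = pvMis n1 n2 from rfl]
  cases h : pvMis n1 n2 with
  | nil => simp [PySem.Set.ofList, PySem.Set.len]
  | cons p rest =>
    show (rest.all fun q => decide (q = p)) = _
    have hofl : PySem.Set.ofList (p :: rest) = rest.foldl PySem.Set.add [p] := by
      simp [PySem.Set.ofList, PySem.Set.add, PySem.Set.contains]
    rw [hofl]
    simp only [PySem.Set.len]
    rw [← foldl_add_singleton rest p, decide_eq_decide]
    constructor <;> intro h <;> exact_mod_cast h
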